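-- pv_equiv track=rewrite | github.com/Koubae/Algorithm-Complete-Guide | Algorithms/src/Sort-Algorithms/Maximum_difference_arr.py | little_big_sort
-- ===== SOURCE A (Python) =====
-- def little_big_sort(l):
--     s = sorted(l)
--     result = []
--     result.append(s.pop(0))
--
--     while len(s):
--         if s:
--             result.insert(len(result), s.pop(-1))
--         if s:
--             result.insert(0, s.pop(-1))
--         if s:
--             result.insert(len(result), s.pop(0))
--         if s:
--             result.insert(0, s.pop(0))
--
--     return result
-- ===== SOURCE B (Python) =====
-- def little_big_sort(l):
--     s = sorted(l)
--     back = [s[0]]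
--     front = []
--     lo, hi = 1, len(s) - 1
--     while lo <= hi:
--         back.append(s[hi]); hi -= 1
--         if lo <= hi:
--             front.append(s[hi]); hi -= 1
--         if lo <= hi:
--             back.append(s[lo]); lo += 1
--         if lo <= hi:
--             front.append(s[lo]); lo += 1
--     front.reverse()
--     return front + back
-- ===== Notes on version B (the rewrite author's own statement) =====
-- stated objective: faster
-- what changed: Replaced A's loop of O(n) list mutations (pop(0)/pop(-1) on the remaining sorted list plus insert at position 0) by two index pointers into the sorted array that append to separate front/back output lists, reversing the front once at the end.
-- outside the precondition, e.g. on little_big_sort([]): A raises IndexError, B raises IndexError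
import Mathlib
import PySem

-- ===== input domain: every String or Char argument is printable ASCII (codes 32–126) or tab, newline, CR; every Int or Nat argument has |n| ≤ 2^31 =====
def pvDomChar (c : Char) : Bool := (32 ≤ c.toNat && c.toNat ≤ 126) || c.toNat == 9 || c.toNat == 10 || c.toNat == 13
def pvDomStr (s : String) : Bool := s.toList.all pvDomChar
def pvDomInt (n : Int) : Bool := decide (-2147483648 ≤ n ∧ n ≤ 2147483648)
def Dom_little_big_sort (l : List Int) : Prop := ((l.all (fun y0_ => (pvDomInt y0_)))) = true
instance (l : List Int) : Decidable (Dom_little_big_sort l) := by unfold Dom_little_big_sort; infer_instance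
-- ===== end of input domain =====

-- B replaces A's quadratic pop/insert-at-front loop by two pointers into the sorted
-- array with separate front/back output lists (front reversed once at the end); same
-- return value on every non-empty list (A raises IndexError on []).

-- ===== PORT A =====
-- the while body's four steps; each `if s:` guard becomes a match on pop? (none = empty,
-- unreachable under the guard).  The first `if s:` of the body is the while condition itself.
def littleBigLoop (s result : List Int) : List Int :=
  if s.length ≠ 0 then
    match h1 : PySem.List.pop? s (-1) with
    | none => result   -- unreachable: s nonempty
    | some (x1, s1) =>
      let r1 := PySem.List.insert result (result.length : Int) x1
      if s1 ≠ [] then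
        match h2 : PySem.List.pop? s1 (-1) with
        | none => r1
        | some (x2, s2) =>
          let r2 := PySem.List.insert r1 0 x2
          if s2 ≠ [] then
            match h3 : PySem.List.pop? s2 0 with
            | none => r2
            | some (x3, s3) =>
              let r3 := PySem.List.insert r2 (r2.length : Int) x3
              if s3 ≠ [] then
                match h4 : PySem.List.pop? s3 0 with
                | none => r3
                | some (x4, s4) =>
                  let r4 := PySem.List.insert r3 0 x4
                  littleBigLoop s4 r4
              else littleBigLoop s3 r3
          else littleBigLoop s2 r2
      else littleBigLoop s1 r1
  else result
termination_by s.length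
decreasing_by
  · have e1 : s1.length + 1 = s.length := PySem.List.length_of_pop?_eq_some _ h1
    have e2 : s2.length + 1 = s1.length := PySem.List.length_of_pop?_eq_some _ h2
    have e3 : s3.length + 1 = s2.length := PySem.List.length_of_pop?_eq_some _ h3
    have e4 : s4.length + 1 = s3.length := PySem.List.length_of_pop?_eq_some _ h4
    omega
  · have e1 : s1.length + 1 = s.length := PySem.List.length_of_pop?_eq_some _ h1
    have e2 : s2.length + 1 = s1.length := PySem.List.length_of_pop?_eq_some _ h2
    have e3 : s3.length + 1 = s2.length := PySem.List.length_of_pop?_eq_some _ h3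
    omega
  · have e1 : s1.length + 1 = s.length := PySem.List.length_of_pop?_eq_some _ h1
    have e2 : s2.length + 1 = s1.length := PySem.List.length_of_pop?_eq_some _ h2
    omega
  · have e1 : s1.length + 1 = s.length := PySem.List.length_of_pop?_eq_some _ h1
    omega

def little_big_sort (l : List Int) : List Int :=
  let s := PySem.List.sorted l (fun x => x) false
  match PySem.List.pop? s 0 with
  | none => []           -- s.pop(0) on empty s: IndexError, excluded by Pre_
  | some (x, s') => littleBigLoop s' [x]

-- ===== PORT B =====
-- the while loop of Source B; returns the final (front, back) pair
def littleBigFan (s : List Int) (lo hi : Int) (front back : List Int) :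
    List Int × List Int :=
  if lo ≤ hi then
    let back1 := back ++ [PySem.List.pyGetD s hi 0]
    let hi1 := hi - 1
    if lo ≤ hi1 then
      let front1 := front ++ [PySem.List.pyGetD s hi1 0]
      let hi2 := hi1 - 1
      if lo ≤ hi2 then
        let back2 := back1 ++ [PySem.List.pyGetD s lo 0]
        let lo1 := lo + 1
        if lo1 ≤ hi2 then
          littleBigFan s (lo1 + 1) hi2 (front1 ++ [PySem.List.pyGetD s lo1 0]) back2
        else littleBigFan s lo1 hi2 front1 back2
      else littleBigFan s lo hi2 front1 back1
    else littleBigFan s lo hi1 front back1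
  else (front, back)
termination_by (hi + 1 - lo).toNat
decreasing_by all_goals omega

def little_big_sort_alt (l : List Int) : List Int :=
  let s := PySem.List.sorted l (fun x => x) false
  match PySem.List.pyGet? s 0 with
  | none => []           -- s[0] on empty s: IndexError, excluded by Pre_
  | some x =>
    let p := littleBigFan s 1 ((s.length : Int) - 1) [] [x]
    p.1.reverse ++ p.2

-- ===== PRECONDITION & SPEC =====
-- A raises IndexError on the empty list (s.pop(0) on []); B raises there too (s[0]).
def Pre_little_big_sort (l : List Int) : Prop := l ≠ []
instance (l : List Int) : Decidable (Pre_little_big_sort l) := by unfold Pre_little_big_sort; infer_instance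
def pvWitness_little_big_sort : List Int := [3, 1, 2]

def Spec_little_big_sort (l : List Int) (out : List Int) : Prop := out = little_big_sort_alt l
instance (l : List Int) (out : List Int) : Decidable (Spec_little_big_sort l out) := by unfold Spec_little_big_sort; infer_instance

-- ===== CLAIM (what is proved, stated in full; the proofs are below) =====
def Claim_equal_little_big_sort : Prop := ∀ (l : List Int), Dom_little_big_sort l → Pre_little_big_sort l → Spec_little_big_sort l (little_big_sort l)

-- ===== LEMMAS AND PROOFS =====

-- the contiguous slice s[lo .. hi] (inclusive), the remaining elements of A's list
def pvSliceD (s : List Int) (lo hi : Int) : List Int :=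
  (s.drop lo.toNat).take (hi + 1 - lo).toNat

theorem pvSliceD_length (s : List Int) (lo hi : Int) (h0 : 0 ≤ lo) (hhi : hi < s.length) :
    (pvSliceD s lo hi).length = (hi + 1 - lo).toNat := by
  simp [pvSliceD]
  omega

theorem pvInsert_len (xs : List Int) (v : Int) :
    PySem.List.insert xs (xs.length : Int) v = xs ++ [v] := by
  have h : ¬ ((xs.length : Int) < 0) := by omega
  simp [PySem.List.insert, PySem.List.sliceIndices, h]

theorem pvInsert_zero (xs : List Int) (v : Int) :
    PySem.List.insert xs 0 v = v :: xs := by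
  simp [PySem.List.insert, PySem.List.sliceIndices]

theorem pvGetD_at (s : List Int) (i : Int) (h0 : 0 ≤ i) (hi : i < s.length) :
    PySem.List.pyGetD s i 0 = s[i.toNat]'(by omega) := by
  rw [PySem.List.pyGetD_of_nonneg _ _ h0]
  rw [List.getD_eq_getElem _ _ (by omega)]

theorem pvStepLo (s : List Int) (lo hi : Int) (h0 : 0 ≤ lo) (hlh : lo ≤ hi)
    (hhi : hi < s.length) :
    PySem.List.pop? (pvSliceD s lo hi) 0
      = some (PySem.List.pyGetD s lo 0, pvSliceD s (lo + 1) hi) := by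
  have hlt : lo.toNat < s.length := by omega
  have hdrop : s.drop lo.toNat = s[lo.toNat] :: s.drop (lo.toNat + 1) :=
    List.drop_eq_getElem_cons hlt
  have hk : (hi + 1 - lo).toNat = (hi + 1 - (lo + 1)).toNat + 1 := by omega
  have hlo1 : (lo + 1).toNat = lo.toNat + 1 := by omega
  rw [pvSliceD, hdrop, hk, List.take_succ_cons, PySem.List.pop?_zero_cons,
      pvGetD_at s lo h0 (by omega), pvSliceD, hlo1]

theorem pvStepHi (s : List Int) (lo hi : Int) (h0 : 0 ≤ lo) (hlh : lo ≤ hi)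
    (hhi : hi < s.length) :
    PySem.List.pop? (pvSliceD s lo hi) (-1)
      = some (PySem.List.pyGetD s hi 0, pvSliceD s lo (hi - 1)) := by
  have hk : (hi + 1 - lo).toNat = (hi - lo).toNat + 1 := by omega
  have hlen : (hi - lo).toNat < (s.drop lo.toNat).length := by
    simp; omega
  have hidx : lo.toNat + (hi - lo).toNat = hi.toNat := by omega
  have hsplit : pvSliceD s lo hi = pvSliceD s lo (hi - 1) ++ [s[hi.toNat]'(by omega)] := by
    rw [pvSliceD, hk, List.take_add_one, List.getElem?_eq_getElem hlen]
    simp only [List.getElem_drop, Option.toList_some]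
    rw [pvSliceD]
    have h2 : hi - 1 + 1 - lo = hi - lo := by ring
    rw [h2]
    congr 1
    simp only [hidx]
  rw [hsplit, PySem.List.pop?_last, pvGetD_at s hi (by omega) hhi]

theorem pvSliceD_eq_nil (s : List Int) (lo hi : Int) (h : ¬ lo ≤ hi) :
    pvSliceD s lo hi = [] := by
  unfold pvSliceD
  have h1 : (hi + 1 - lo).toNat = 0 := by omega
  rw [h1, List.take_zero]

theorem pvSliceD_ne_nil (s : List Int) (lo hi : Int) (h0 : 0 ≤ lo) (hc : lo ≤ hi)
    (hhi : hi < s.length) : pvSliceD s lo hi ≠ [] := by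
  intro he
  have h := pvSliceD_length s lo hi h0 hhi
  rw [he] at h
  simp at h
  omega

theorem pvLockstep : ∀ (n : Nat) (s : List Int) (lo hi : Int) (front back : List Int),
    0 ≤ lo → hi < s.length → (hi + 1 - lo).toNat ≤ n →
    littleBigLoop (pvSliceD s lo hi) (front.reverse ++ back)
      = (littleBigFan s lo hi front back).1.reverse ++ (littleBigFan s lo hi front back).2 := by
  intro n
  induction n with
  | zero =>
    intro s lo hi front back h0 hhi hn
    have hc : ¬ lo ≤ hi := by omega
    rw [littleBigLoop, littleBigFan, pvSliceD_eq_nil s lo hi hc]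
    simp [hc]
  | succ n ih =>
    intro s lo hi front back h0 hhi hn
    by_cases hc : lo ≤ hi
    · rw [littleBigLoop, littleBigFan]
      rw [if_pos hc, if_pos (show ¬ (pvSliceD s lo hi).length = 0 from by
        rw [pvSliceD_length s lo hi h0 hhi]; omega)]
      rw [pvStepHi s lo hi h0 hc hhi]
      dsimp only
      rw [pvInsert_len]
      by_cases hc2 : lo ≤ hi - 1
      case neg =>
        rw [if_neg (by simp [pvSliceD_eq_nil s lo (hi - 1) hc2]), if_neg hc2]
        have h := ih s lo (hi - 1) front (back ++ [PySem.List.pyGetD s hi 0]) h0 (by omega) (by omega)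
        simpa using h
      case pos =>
        rw [if_pos (pvSliceD_ne_nil s lo (hi - 1) h0 hc2 (by omega)), if_pos hc2]
        rw [pvStepHi s lo (hi - 1) h0 hc2 (by omega)]
        dsimp only
        rw [pvInsert_zero]
        by_cases hc3 : lo ≤ hi - 1 - 1
        case neg =>
          rw [if_neg (by simp [pvSliceD_eq_nil s lo (hi - 1 - 1) hc3]), if_neg hc3]
          have h := ih s lo (hi - 1 - 1) (front ++ [PySem.List.pyGetD s (hi - 1) 0])
            (back ++ [PySem.List.pyGetD s hi 0]) h0 (by omega) (by omega)
          simpa using h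
        case pos =>
          rw [if_pos (pvSliceD_ne_nil s lo (hi - 1 - 1) h0 hc3 (by omega)), if_pos hc3]
          rw [pvStepLo s lo (hi - 1 - 1) h0 hc3 (by omega)]
          dsimp only
          rw [pvInsert_len]
          by_cases hc4 : lo + 1 ≤ hi - 1 - 1
          case neg =>
            rw [if_neg (by simp [pvSliceD_eq_nil s (lo + 1) (hi - 1 - 1) hc4]), if_neg hc4]
            have h := ih s (lo + 1) (hi - 1 - 1)
              (front ++ [PySem.List.pyGetD s (hi - 1) 0])
              (back ++ [PySem.List.pyGetD s hi 0] ++ [PySem.List.pyGetD s lo 0])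
              (by omega) (by omega) (by omega)
            simpa using h
          case pos =>
            rw [if_pos (pvSliceD_ne_nil s (lo + 1) (hi - 1 - 1) (by omega) hc4 (by omega)), if_pos hc4]
            rw [pvStepLo s (lo + 1) (hi - 1 - 1) (by omega) hc4 (by omega)]
            dsimp only
            rw [pvInsert_zero]
            have h := ih s (lo + 1 + 1) (hi - 1 - 1)
              (front ++ [PySem.List.pyGetD s (hi - 1) 0] ++ [PySem.List.pyGetD s (lo + 1) 0])
              (back ++ [PySem.List.pyGetD s hi 0] ++ [PySem.List.pyGetD s lo 0])
              (by omega) (by omega) (by omega)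
            simpa using h
    · rw [littleBigLoop, littleBigFan, pvSliceD_eq_nil s lo hi hc]
      simp [hc]

theorem pvMain (l : List Int) (h : l ≠ []) :
    little_big_sort l = little_big_sort_alt l := by
  unfold little_big_sort little_big_sort_alt
  obtain ⟨x, t, hx⟩ := List.exists_cons_of_ne_nil
    (show PySem.List.sorted l (fun x => x) false ≠ [] by
      simpa [PySem.List.sorted_eq_nil_iff] using h)
  dsimp only
  rw [hx, PySem.List.pop?_zero_cons, PySem.List.pyGet?_zero_cons]
  dsimp only
  have h2 : pvSliceD (x :: t) 1 (((x :: t).length : Int) - 1) = t := by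
    unfold pvSliceD
    have h4 : ((((x :: t).length : Int) - 1 + 1 - 1)).toNat = t.length := by
      simp only [List.length_cons]; omega
    rw [h4]
    simp
  have h3 := pvLockstep t.length (x :: t) 1 (((x :: t).length : Int) - 1) [] [x]
    (by omega) (by simp only [List.length_cons]; omega)
    (by simp only [List.length_cons]; omega)
  rw [h2] at h3
  simpa using h3

-- ===== VERDICT (by name: the statement is the Claim_ definition above) =====
theorem little_big_sort_spec : Claim_equal_little_big_sort := by
  intro l _ hpre
  unfold Spec_little_big_sort
  exact pvMain l hpre
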